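-- pv_equiv track=rewrite | github.com/bantic/jupyter-notebooks | google-code-jam/2022/punched-cards.py | solve
-- ===== SOURCE A (Python) =====
-- def solve(r,c):
--   out = []
--   out.append(".." + "+-" * (c-1) + "+")
--   out.append(".." + "|." * (c-1) + "|")
--   for _ in range(r-1):
--     out.append("+-"*c + "+")
--     out.append("|."*c + "|")
--   out.append("+-"*c + "+")
--   return "\n".join(out)
-- ===== SOURCE B (Python) =====
-- def solve(r, c):
--     def line(i):
--         return "".join(
--             '.' if i < 2 and j < 2 else
--             '+' if i % 2 == 0 and j % 2 == 0 else
--             '-' if i % 2 == 0 else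
--             '|' if j % 2 == 0 else
--             '.'
--             for j in range(2 * c + 1))
--     lines = [line(0), line(1)] + [line(2), line(3)] * (r - 1) + [line(2)]
--     return "\n".join(lines)
-- ===== Notes on version B (the rewrite author's own statement) =====
-- stated objective: alternative
-- what changed: B contains no row-template string literals at all: every character is computed from its coordinates by a pure cell(i,j) parity function (corner/even-even/even/odd rules), each line is assembled character by character from cell(i,·), and the line list is built by list repetition; A instead appends precomputed per-row template strings ('..'+'+-'*(c-1)+'+', ...) in a loop. Pre_ restricts to the problem's natural domain c >= 1; for c <= 0 A returns degenerate strings a coordinate construction does not build.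
-- outside the precondition, e.g. on solve(2, 0): A returns '..+\n..|\n+\n|\n+', B returns '.\n.\n+\n|\n+'; on solve(2, -2): A returns '..+\n..|\n+\n|\n+', B returns '\n\n\n\n'
import Mathlib
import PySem

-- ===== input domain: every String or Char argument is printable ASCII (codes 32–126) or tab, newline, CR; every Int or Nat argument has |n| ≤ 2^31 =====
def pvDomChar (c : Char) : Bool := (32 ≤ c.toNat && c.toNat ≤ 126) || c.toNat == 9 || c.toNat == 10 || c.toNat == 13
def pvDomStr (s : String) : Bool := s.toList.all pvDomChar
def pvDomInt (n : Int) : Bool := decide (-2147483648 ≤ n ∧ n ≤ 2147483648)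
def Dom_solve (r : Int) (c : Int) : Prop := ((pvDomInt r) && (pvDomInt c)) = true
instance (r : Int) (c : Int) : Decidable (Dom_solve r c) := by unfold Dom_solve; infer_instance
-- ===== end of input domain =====

-- B computes every grid character from its coordinates with a pure cell(i, j) parity
-- function (no template string literals) instead of A's precomputed per-row templates;
-- objective: alternative algorithm, same cost.

-- Python `s * n` / `list * n` (exact: empty for n ≤ 0); used by both ports
def strMul (s : String) (n : Int) : String :=
  String.ofList (PySem.List.pyRepeat s.toList n)

-- ===== PORT A =====
def solve (r : Int) (c : Int) : String :=
  let out : List String := []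
  let out := out ++ [".." ++ strMul "+-" (c - 1) ++ "+"]
  let out := out ++ [".." ++ strMul "|." (c - 1) ++ "|"]
  let out := (PySem.List.pyRange 0 (r - 1) 1).foldl
      (fun acc _ => (acc ++ [strMul "+-" c ++ "+"]) ++ [strMul "|." c ++ "|"]) out
  let out := out ++ [strMul "+-" c ++ "+"]
  PySem.Str.join "\n" out

-- ===== PORT B =====
-- B's cell(i, j): the character at grid coordinates (i, j)
def cellB (i : Int) (j : Int) : Char :=
  if i < 2 ∧ j < 2 then '.'
  else if PySem.Int.mod i 2 = 0 ∧ PySem.Int.mod j 2 = 0 then '+'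
  else if PySem.Int.mod i 2 = 0 then '-'
  else if PySem.Int.mod j 2 = 0 then '|'
  else '.'

-- B's line(i): row i assembled character by character from cell(i, j)
def lineB (c : Int) (i : Int) : String :=
  String.ofList ((PySem.List.pyRange 0 (2 * c + 1) 1).map (fun j => cellB i j))

def solve_alt (r : Int) (c : Int) : String :=
  let lines := [lineB c 0, lineB c 1] ++
      PySem.List.pyRepeat [lineB c 2, lineB c 3] (r - 1) ++ [lineB c 2]
  PySem.Str.join "\n" lines

-- ===== PRECONDITION & SPEC =====
-- Pre_ excludes c ≤ 0 (outside the problem's natural domain: a card with no columns),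
-- where A returns degenerate strings that B's coordinate construction does not build.
def Pre_solve (r : Int) (c : Int) : Prop := 1 ≤ c
instance (r : Int) (c : Int) : Decidable (Pre_solve r c) := by unfold Pre_solve; infer_instance
def pvWitness_solve : Int × Int := (2, 3)

def Spec_solve (r : Int) (c : Int) (out : String) : Prop := out = solve_alt r c
instance (r : Int) (c : Int) (out : String) : Decidable (Spec_solve r c out) := by unfold Spec_solve; infer_instance

-- ===== CLAIM (what is proved, stated in full; the proofs are below) =====
def Claim_equal_solve : Prop := ∀ (r : Int) (c : Int), Dom_solve r c → Pre_solve r c → Spec_solve r c (solve r c)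

-- ===== LEMMAS AND PROOFS =====

lemma strMul_toList (s : String) (i : Int) :
    (strMul s i).toList = (List.replicate i.toNat s.toList).flatten := by
  simp [strMul, PySem.List.pyRepeat]

-- A's for-loop: m appends of the same two lines
lemma foldl_app {α β : Type} (l : List α) (x y : β) (init : List β) :
    l.foldl (fun acc _ => (acc ++ [x]) ++ [y]) init =
      init ++ (List.replicate l.length ([x, y] : List β)).flatten := by
  induction l generalizing init with
  | nil => simp
  | cons a l ih => simp only [List.foldl_cons]; rw [ih]; simp [List.replicate_succ]

-- evaluations of B's cell function
lemma cell_plus (i j : Int) (h : ¬(i < 2 ∧ j < 2)) (hi : i % 2 = 0) (hj : j % 2 = 0) :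
    cellB i j = '+' := by
  have hi' : PySem.Int.mod i 2 = 0 := by rw [PySem.Int.mod_eq_emod_of_pos (by norm_num)]; exact hi
  have hj' : PySem.Int.mod j 2 = 0 := by rw [PySem.Int.mod_eq_emod_of_pos (by norm_num)]; exact hj
  unfold cellB
  rw [if_neg h, hi', hj']
  norm_num

lemma cell_minus (i j : Int) (h : ¬(i < 2 ∧ j < 2)) (hi : i % 2 = 0) (hj : j % 2 = 1) :
    cellB i j = '-' := by
  have hi' : PySem.Int.mod i 2 = 0 := by rw [PySem.Int.mod_eq_emod_of_pos (by norm_num)]; exact hi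
  have hj' : PySem.Int.mod j 2 = 1 := by rw [PySem.Int.mod_eq_emod_of_pos (by norm_num)]; exact hj
  unfold cellB
  rw [if_neg h, hi', hj']
  norm_num

lemma cell_pipe (i j : Int) (h : ¬(i < 2 ∧ j < 2)) (hi : i % 2 = 1) (hj : j % 2 = 0) :
    cellB i j = '|' := by
  have hi' : PySem.Int.mod i 2 = 1 := by rw [PySem.Int.mod_eq_emod_of_pos (by norm_num)]; exact hi
  have hj' : PySem.Int.mod j 2 = 0 := by rw [PySem.Int.mod_eq_emod_of_pos (by norm_num)]; exact hj
  unfold cellB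
  rw [if_neg h, hi', hj']
  norm_num

lemma cell_dot (i j : Int) (h : ¬(i < 2 ∧ j < 2)) (hi : i % 2 = 1) (hj : j % 2 = 1) :
    cellB i j = '.' := by
  have hi' : PySem.Int.mod i 2 = 1 := by rw [PySem.Int.mod_eq_emod_of_pos (by norm_num)]; exact hi
  have hj' : PySem.Int.mod j 2 = 1 := by rw [PySem.Int.mod_eq_emod_of_pos (by norm_num)]; exact hj
  unfold cellB
  rw [if_neg h, hi', hj']
  norm_num

-- B's row i = 0 as a character list
lemma rowTop (k : ℕ) :
    (List.range (2 * k + 3)).map (fun j : ℕ => cellB 0 (j : Int)) =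
      ['.', '.'] ++ (List.replicate k (['+', '-'] : List Char)).flatten ++ ['+'] := by
  induction k with
  | zero => decide
  | succ k ih =>
      have h1 : 2 * (k + 1) + 3 = (2 * k + 3) + 1 + 1 := by ring
      rw [h1, List.range_succ, List.range_succ]
      simp only [List.map_append, List.map_cons, List.map_nil, ih]
      rw [cell_minus _ _ (by push_cast; omega) (by norm_num) (by push_cast; omega),
          cell_plus _ _ (by push_cast; omega) (by norm_num) (by push_cast; omega)]
      simp [List.replicate_succ', List.append_assoc]

-- B's row i = 1 as a character list
lemma rowSecond (k : ℕ) :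
    (List.range (2 * k + 3)).map (fun j : ℕ => cellB 1 (j : Int)) =
      ['.', '.'] ++ (List.replicate k (['|', '.'] : List Char)).flatten ++ ['|'] := by
  induction k with
  | zero => decide
  | succ k ih =>
      have h1 : 2 * (k + 1) + 3 = (2 * k + 3) + 1 + 1 := by ring
      rw [h1, List.range_succ, List.range_succ]
      simp only [List.map_append, List.map_cons, List.map_nil, ih]
      rw [cell_dot _ _ (by push_cast; omega) (by norm_num) (by push_cast; omega),
          cell_pipe _ _ (by push_cast; omega) (by norm_num) (by push_cast; omega)]
      simp [List.replicate_succ', List.append_assoc]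

-- B's even rows i ≥ 2 as a character list
lemma rowBar (i : Int) (h2 : 2 ≤ i) (he : i % 2 = 0) (k : ℕ) :
    (List.range (2 * k + 3)).map (fun j : ℕ => cellB i (j : Int)) =
      (List.replicate (k + 1) (['+', '-'] : List Char)).flatten ++ ['+'] := by
  induction k with
  | zero =>
      show [cellB i 0, cellB i 1, cellB i 2] = _
      rw [cell_plus _ _ (by omega) he (by norm_num),
          cell_minus _ _ (by omega) he (by norm_num),
          cell_plus _ _ (by omega) he (by norm_num)]
      decide
  | succ k ih =>
      have h1 : 2 * (k + 1) + 3 = (2 * k + 3) + 1 + 1 := by ring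
      rw [h1, List.range_succ, List.range_succ]
      simp only [List.map_append, List.map_cons, List.map_nil, ih]
      rw [cell_minus _ _ (by omega) he (by push_cast; omega),
          cell_plus _ _ (by omega) he (by push_cast; omega)]
      simp [List.replicate_succ', List.append_assoc]

-- B's odd rows i ≥ 3 as a character list
lemma rowMid (i : Int) (h2 : 2 ≤ i) (ho : i % 2 = 1) (k : ℕ) :
    (List.range (2 * k + 3)).map (fun j : ℕ => cellB i (j : Int)) =
      (List.replicate (k + 1) (['|', '.'] : List Char)).flatten ++ ['|'] := by
  induction k with
  | zero =>
      show [cellB i 0, cellB i 1, cellB i 2] = _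
      rw [cell_pipe _ _ (by omega) ho (by norm_num),
          cell_dot _ _ (by omega) ho (by norm_num),
          cell_pipe _ _ (by omega) ho (by norm_num)]
      decide
  | succ k ih =>
      have h1 : 2 * (k + 1) + 3 = (2 * k + 3) + 1 + 1 := by ring
      rw [h1, List.range_succ, List.range_succ]
      simp only [List.map_append, List.map_cons, List.map_nil, ih]
      rw [cell_dot _ _ (by omega) ho (by push_cast; omega),
          cell_pipe _ _ (by omega) ho (by push_cast; omega)]
      simp [List.replicate_succ', List.append_assoc]

lemma string_eq_of_toList {s t : String} (h : s.toList = t.toList) : s = t :=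
  String.toList_inj.mp h

-- B's line(i) as a map over List.range, for c = k + 1
lemma lineB_toList (c : Int) (k : ℕ) (hc : c = (k : Int) + 1) (i : Int) :
    (lineB c i).toList = (List.range (2 * k + 3)).map (fun j : ℕ => cellB i (j : Int)) := by
  have e : (2 * c + 1 - 0).toNat = 2 * k + 3 := by omega
  unfold lineB
  rw [String.toList_ofList, PySem.List.pyRange_one]
  simp only [e, List.map_map, Function.comp_def, zero_add]

-- the four line equalities between B's coordinate lines and A's templates
lemma line0_eq (c : Int) (k : ℕ) (hc : c = (k : Int) + 1) :
    lineB c 0 = ".." ++ strMul "+-" (c - 1) ++ "+" := by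
  apply string_eq_of_toList
  rw [lineB_toList c k hc, rowTop k]
  simp only [String.toList_append, strMul_toList]
  rw [show (c - 1).toNat = k from by omega,
      show ("..".toList) = ['.', '.'] from by decide,
      show ("+-".toList) = ['+', '-'] from by decide,
      show ("+".toList) = ['+'] from by decide]

lemma line1_eq (c : Int) (k : ℕ) (hc : c = (k : Int) + 1) :
    lineB c 1 = ".." ++ strMul "|." (c - 1) ++ "|" := by
  apply string_eq_of_toList
  rw [lineB_toList c k hc, rowSecond k]
  simp only [String.toList_append, strMul_toList]
  rw [show (c - 1).toNat = k from by omega,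
      show ("..".toList) = ['.', '.'] from by decide,
      show ("|.".toList) = ['|', '.'] from by decide,
      show ("|".toList) = ['|'] from by decide]

lemma line2_eq (c : Int) (k : ℕ) (hc : c = (k : Int) + 1) :
    lineB c 2 = strMul "+-" c ++ "+" := by
  apply string_eq_of_toList
  rw [lineB_toList c k hc, rowBar 2 (by norm_num) (by norm_num) k]
  simp only [String.toList_append, strMul_toList]
  rw [show c.toNat = k + 1 from by omega,
      show ("+-".toList) = ['+', '-'] from by decide,
      show ("+".toList) = ['+'] from by decide]

lemma line3_eq (c : Int) (k : ℕ) (hc : c = (k : Int) + 1) :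
    lineB c 3 = strMul "|." c ++ "|" := by
  apply string_eq_of_toList
  rw [lineB_toList c k hc, rowMid 3 (by norm_num) (by norm_num) k]
  simp only [String.toList_append, strMul_toList]
  rw [show c.toNat = k + 1 from by omega,
      show ("|.".toList) = ['|', '.'] from by decide,
      show ("|".toList) = ['|'] from by decide]

-- ===== VERDICT (by name: the statement is the Claim_ definition above) =====
theorem solve_spec : Claim_equal_solve := by
  intro r c _ hpre
  have hc : 1 ≤ c := hpre
  obtain ⟨k, hk⟩ : ∃ k : ℕ, c = (k : Int) + 1 := ⟨(c - 1).toNat, by omega⟩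
  show solve r c = solve_alt r c
  unfold solve solve_alt
  dsimp only
  rw [foldl_app, line0_eq c k hk, line1_eq c k hk, line2_eq c k hk, line3_eq c k hk]
  have e1 : (PySem.List.pyRange 0 (r - 1) 1).length = (r - 1).toNat := by
    rw [PySem.List.length_pyRange_one]; omega
  rw [e1]
  simp [PySem.List.pyRepeat]
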